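-- pv_equiv track=rewrite | github.com/sergism77/Seigr | src/crypto/helpers.py | _base6_encode
-- ===== SOURCE A (Python) =====
-- def _base6_encode(byte: int) -> str:
--     """
--     **Encodes a single byte to base-6 with fixed width.**
--
--     Args:
--         byte (int): **Byte value to encode.**
--
--     Returns:
--         str: **Base-6 encoded string.**
--     """
--     if not (0 <= byte < 256):
--         raise ValueError("Byte out of range for encoding")
--     senary_digits = []
--     for _ in range(2):
--         senary_digits.append(str(byte % 6))
--         byte //= 6
--     return "".join(reversed(senary_digits))
-- ===== SOURCE B (Python) =====
-- def _base6_encode(byte: int) -> str: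
--     if not (0 <= byte < 256):
--         raise ValueError("Byte out of range for encoding")
--     return f"{(byte // 6) % 6}{byte % 6}"
-- ===== Notes on version B (the rewrite author's own statement) =====
-- stated objective: simpler
-- what changed: Replaced the digit-accumulating loop with list reversal and join by a direct closed-form expression computing the two base-6 digits arithmetically.
import Mathlib
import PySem

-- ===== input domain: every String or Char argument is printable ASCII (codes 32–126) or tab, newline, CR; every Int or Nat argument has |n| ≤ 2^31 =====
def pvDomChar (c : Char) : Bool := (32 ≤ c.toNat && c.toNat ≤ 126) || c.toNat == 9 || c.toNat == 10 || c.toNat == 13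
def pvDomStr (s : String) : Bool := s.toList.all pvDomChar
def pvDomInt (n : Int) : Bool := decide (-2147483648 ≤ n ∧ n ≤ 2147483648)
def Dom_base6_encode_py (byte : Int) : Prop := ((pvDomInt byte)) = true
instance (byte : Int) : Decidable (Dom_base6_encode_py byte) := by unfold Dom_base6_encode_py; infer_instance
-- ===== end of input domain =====

-- B changes A's digit-accumulating loop (append, reverse, join) into one closed-form
-- two-digit expression; objective: simpler.

-- ===== PORT A =====
-- literal port of A's loop: for _ in range(2): append str(byte % 6); byte //= 6
def base6_encode_py (byte : Int) : String :=
  let st := (PySem.List.pyRange 0 2 1).foldl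
    (fun (st : List String × Int) _ =>
      (st.1 ++ [PySem.Int.toStr (PySem.Int.mod st.2 6)], PySem.Int.floordiv st.2 6))
    (([] : List String), byte)
  PySem.Str.join "" st.1.reverse

-- ===== PORT B =====
def base6_encode_py_alt (byte : Int) : String :=
  PySem.Int.toStr (PySem.Int.mod (PySem.Int.floordiv byte 6) 6) ++
    PySem.Int.toStr (PySem.Int.mod byte 6)

-- ===== PRECONDITION & SPEC =====
-- A raises ValueError for byte values outside the single-byte range
def Pre_base6_encode_py (byte : Int) : Prop := 0 ≤ byte ∧ byte < 256
instance (byte : Int) : Decidable (Pre_base6_encode_py byte) := by unfold Pre_base6_encode_py; infer_instance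
def pvWitness_base6_encode_py : Int := (42)

def Spec_base6_encode_py (byte : Int) (out : String) : Prop := out = base6_encode_py_alt byte
instance (byte : Int) (out : String) : Decidable (Spec_base6_encode_py byte out) := by unfold Spec_base6_encode_py; infer_instance

-- ===== CLAIM (what is proved, stated in full; the proofs are below) =====
def Claim_equal_base6_encode_py : Prop := ∀ (byte : Int), Dom_base6_encode_py byte → Pre_base6_encode_py byte → Spec_base6_encode_py byte (base6_encode_py byte)

-- ===== LEMMAS AND PROOFS =====
-- unfold A's two-iteration fold and the join of the two reversed digit strings
theorem base6_key (byte : Int) : base6_encode_py byte = base6_encode_py_alt byte := by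
  apply String.toList_injective
  simp [base6_encode_py, base6_encode_py_alt, PySem.List.pyRange, PySem.Str.join,
    List.range_succ, PySem.Chars.join_cons_cons, PySem.Chars.join_singleton,
    PySem.Int.toList_toStr]

-- ===== VERDICT (by name: the statement is the Claim_ definition above) =====
theorem base6_encode_py_spec : Claim_equal_base6_encode_py := by
  intro byte _ _
  exact base6_key byte
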